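-- pv_equiv track=rewrite | github.com/EEB113A/hw4-Code-Review | 1090310_白佳浚.py | to_1D_array
-- ===== SOURCE A (Python) =====
-- def to_1D_array(Matrix, Major): # Matrix型態:list[list]，Major型態:str
--     lst = []
--     Matrix_x1_sum = sum(Matrix[0])
--     Matrix_x2_sum = sum(Matrix[len(Matrix)-1])
--     Matrix_y1_sum = 0
--     Matrix_y2_sum = 0
--     for i in range(len(Matrix)):
--         Matrix_y1_sum += Matrix[i][0]
--     for i in range(len(Matrix)):
--         Matrix_y2_sum += Matrix[i][len(Matrix)-1]
--     if  Matrix[0][0] == Matrix_x1_sum and  Matrix[0][len(Matrix)-1] == 0 and Matrix[len(Matrix)-1][len(Matrix)-1] == Matrix_y2_sum: #左下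
--         if Major == "c":
--             for j in range(len(Matrix)):
--                 for i in range(j, len(Matrix)):
--                     lst.append(Matrix[i][j])
--         elif Major == "r":
--             for i in range(len(Matrix)):
--                 for j in range(i+1):
--                     lst.append(Matrix[i][j])
--     elif Matrix[0][0] == 0 and Matrix[0][len(Matrix)-1] == Matrix_x2_sum and Matrix[len(Matrix)-1][0] == Matrix_y1_sum: #右下
--         if Major == "c":
--             for j in range(len(Matrix)):
--                 for i in range(len(Matrix)-j-1, len(Matrix)):
--                     lst.append(Matrix[i][j])
--         elif Major == "r":
--             for i in range(len(Matrix)):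
--                 for j in range(len(Matrix)-i-1, len(Matrix)):
--                     lst.append(Matrix[i][j])
--     elif Matrix[len(Matrix)-1][len(Matrix)-1] == 0 and Matrix[0][len(Matrix)-1] == Matrix_y2_sum and Matrix[0][len(Matrix)-1] == Matrix_x2_sum: #左上
--         if Major == "c":
--             for j in range(len(Matrix)):
--                 for i in range(len(Matrix)-j):
--                     lst.append(Matrix[i][j])
--         elif Major == "r":
--             for i in range(len(Matrix)):
--                 for j in range(len(Matrix)-i):
--                     lst.append(Matrix[i][j])
--     elif Matrix[len(Matrix)-1][0] == 0 and Matrix[0][0] == Matrix_y1_sum and Matrix[len(Matrix)-1][len(Matrix)-1] == Matrix_x2_sum: #右上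
--         if Major == "c":
--             for j in range(len(Matrix)):
--                 for i in range(j+1):
--                     lst.append(Matrix[i][j])
--         elif Major == "r":
--             for i in range(len(Matrix)):
--                 for j in range(i,len(Matrix)):
--                     lst.append(Matrix[i][j])
--
--     #Matrix[0][0]     Matrix[0][len(Matrix)-1]     Matrix[len(Matrix)-1][0]          Matrix[len(Matrix)-1][len(Matrix)-1]
--     # if Major == "c":
--     #     Matrix = sort_by_column(Matrix)
--     # elif Major == "r":
--     #     Matrix = sort_by_row(Matrix)
--     return lst# 回傳值型態:list
-- ===== SOURCE B (Python) =====
-- def _keep(corner, n, i, j):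
--     if corner == 1:
--         return i >= j
--     elif corner == 2:
--         return i + j >= n - 1
--     elif corner == 3:
--         return i + j <= n - 1
--     else:
--         return i <= j
--
-- def to_1D_array(Matrix, Major):
--     n = len(Matrix)
--     x1 = sum(Matrix[0])
--     x2 = sum(Matrix[n - 1])
--     y1 = sum(Matrix[i][0] for i in range(n))
--     y2 = sum(Matrix[i][n - 1] for i in range(n))
--     if Matrix[0][0] == x1 and Matrix[0][n - 1] == 0 and Matrix[n - 1][n - 1] == y2:
--         corner = 1  # left-down: keep i >= j
--     elif Matrix[0][0] == 0 and Matrix[0][n - 1] == x2 and Matrix[n - 1][0] == y1: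
--         corner = 2  # right-down: keep i + j >= n - 1
--     elif Matrix[n - 1][n - 1] == 0 and Matrix[0][n - 1] == y2 and Matrix[0][n - 1] == x2:
--         corner = 3  # left-top: keep i + j <= n - 1
--     elif Matrix[n - 1][0] == 0 and Matrix[0][0] == y1 and Matrix[n - 1][n - 1] == x2:
--         corner = 4  # right-top: keep i <= j
--     else:
--         return []
--     out = []
--     if Major == "r":
--         for i in range(n):
--             for j in range(n):
--                 if _keep(corner, n, i, j):
--                     out.append(Matrix[i][j])
--     elif Major == "c":
--         for j in range(n):
--             for i in range(n):
--                 if _keep(corner, n, i, j):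
--                     out.append(Matrix[i][j])
--     return out
-- ===== Notes on version B (the rewrite author's own statement) =====
-- stated objective: alternative
-- what changed: B keeps the four corner-detection tests but replaces A's eight hand-computed per-case triangular ranges by one unified full n-by-n scan (row- or column-major) filtered by a single inclusion predicate per corner.
import Mathlib
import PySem

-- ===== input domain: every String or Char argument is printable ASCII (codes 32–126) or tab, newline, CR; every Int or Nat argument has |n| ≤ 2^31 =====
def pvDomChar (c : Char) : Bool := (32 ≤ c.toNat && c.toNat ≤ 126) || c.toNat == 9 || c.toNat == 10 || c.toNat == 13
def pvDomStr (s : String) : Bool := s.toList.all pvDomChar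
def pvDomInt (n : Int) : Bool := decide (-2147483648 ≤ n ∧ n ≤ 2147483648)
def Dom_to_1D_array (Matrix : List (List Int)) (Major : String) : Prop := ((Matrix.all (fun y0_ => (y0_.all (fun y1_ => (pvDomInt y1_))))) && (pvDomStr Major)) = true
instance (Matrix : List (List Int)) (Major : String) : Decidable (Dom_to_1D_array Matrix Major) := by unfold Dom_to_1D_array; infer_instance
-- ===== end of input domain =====

-- B unifies A's eight per-corner triangular range loops into one full n×n scan filtered by a
-- per-corner inclusion predicate (same corner detection, same element order); objective: alternative.


-- shared trivial accessors (local variables of the Python code)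
def pvN (Matrix : List (List Int)) : Int := (Matrix.length : Int)
def pvGet (Matrix : List (List Int)) (i j : Int) : Int :=
  PySem.List.pyGetD (PySem.List.pyGetD Matrix i []) j 0
def pvX1 (Matrix : List (List Int)) : Int := (PySem.List.pyGetD Matrix 0 []).sum
def pvX2 (Matrix : List (List Int)) : Int := (PySem.List.pyGetD Matrix (pvN Matrix - 1) []).sum
-- the four corner tests, parameterised by the column sums the caller computed
def pvC1 (Matrix : List (List Int)) (y2 : Int) : Bool :=
  (pvGet Matrix 0 0 == pvX1 Matrix) && (pvGet Matrix 0 (pvN Matrix - 1) == 0) &&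
    (pvGet Matrix (pvN Matrix - 1) (pvN Matrix - 1) == y2)
def pvC2 (Matrix : List (List Int)) (y1 : Int) : Bool :=
  (pvGet Matrix 0 0 == 0) && (pvGet Matrix 0 (pvN Matrix - 1) == pvX2 Matrix) &&
    (pvGet Matrix (pvN Matrix - 1) 0 == y1)
def pvC3 (Matrix : List (List Int)) (y2 : Int) : Bool :=
  (pvGet Matrix (pvN Matrix - 1) (pvN Matrix - 1) == 0) && (pvGet Matrix 0 (pvN Matrix - 1) == y2) &&
    (pvGet Matrix 0 (pvN Matrix - 1) == pvX2 Matrix)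
def pvC4 (Matrix : List (List Int)) (y1 : Int) : Bool :=
  (pvGet Matrix (pvN Matrix - 1) 0 == 0) && (pvGet Matrix 0 0 == y1) &&
    (pvGet Matrix (pvN Matrix - 1) (pvN Matrix - 1) == pvX2 Matrix)

-- ===== PORT A =====
-- A's accumulating '+=' loops for the two column sums
def pvY1A (Matrix : List (List Int)) : Int :=
  (PySem.List.pyRange 0 (pvN Matrix) 1).foldl (fun s i => s + pvGet Matrix i 0) 0
def pvY2A (Matrix : List (List Int)) : Int :=
  (PySem.List.pyRange 0 (pvN Matrix) 1).foldl (fun s i => s + pvGet Matrix i (pvN Matrix - 1)) 0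

def to_1D_array (Matrix : List (List Int)) (Major : String) : List Int :=
  let n := pvN Matrix
  if pvC1 Matrix (pvY2A Matrix) then  -- 左下
    if Major == "c" then
      (PySem.List.pyRange 0 n 1).foldl (fun lst j =>
        (PySem.List.pyRange j n 1).foldl (fun lst i => lst ++ [pvGet Matrix i j]) lst) []
    else if Major == "r" then
      (PySem.List.pyRange 0 n 1).foldl (fun lst i =>
        (PySem.List.pyRange 0 (i + 1) 1).foldl (fun lst j => lst ++ [pvGet Matrix i j]) lst) []
    else []
  else if pvC2 Matrix (pvY1A Matrix) then  -- 右下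
    if Major == "c" then
      (PySem.List.pyRange 0 n 1).foldl (fun lst j =>
        (PySem.List.pyRange (n - j - 1) n 1).foldl (fun lst i => lst ++ [pvGet Matrix i j]) lst) []
    else if Major == "r" then
      (PySem.List.pyRange 0 n 1).foldl (fun lst i =>
        (PySem.List.pyRange (n - i - 1) n 1).foldl (fun lst j => lst ++ [pvGet Matrix i j]) lst) []
    else []
  else if pvC3 Matrix (pvY2A Matrix) then  -- 左上
    if Major == "c" then
      (PySem.List.pyRange 0 n 1).foldl (fun lst j =>
        (PySem.List.pyRange 0 (n - j) 1).foldl (fun lst i => lst ++ [pvGet Matrix i j]) lst) []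
    else if Major == "r" then
      (PySem.List.pyRange 0 n 1).foldl (fun lst i =>
        (PySem.List.pyRange 0 (n - i) 1).foldl (fun lst j => lst ++ [pvGet Matrix i j]) lst) []
    else []
  else if pvC4 Matrix (pvY1A Matrix) then  -- 右上
    if Major == "c" then
      (PySem.List.pyRange 0 n 1).foldl (fun lst j =>
        (PySem.List.pyRange 0 (j + 1) 1).foldl (fun lst i => lst ++ [pvGet Matrix i j]) lst) []
    else if Major == "r" then
      (PySem.List.pyRange 0 n 1).foldl (fun lst i =>
        (PySem.List.pyRange i n 1).foldl (fun lst j => lst ++ [pvGet Matrix i j]) lst) []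
    else []
  else []

-- ===== PORT B =====
-- B's generator-expression column sums
def pvY1B (Matrix : List (List Int)) : Int :=
  ((PySem.List.pyRange 0 (pvN Matrix) 1).map (fun i => pvGet Matrix i 0)).sum
def pvY2B (Matrix : List (List Int)) : Int :=
  ((PySem.List.pyRange 0 (pvN Matrix) 1).map (fun i => pvGet Matrix i (pvN Matrix - 1))).sum
-- Source B's _keep
def pvKeep (corner n i j : Int) : Bool :=
  if corner == 1 then decide (j ≤ i)
  else if corner == 2 then decide (n - 1 ≤ i + j)
  else if corner == 3 then decide (i + j ≤ n - 1)
  else decide (i ≤ j)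
-- Source B's corner code (0 = the 'return []' fallthrough)
def pvCorner (Matrix : List (List Int)) : Int :=
  if pvC1 Matrix (pvY2B Matrix) then 1
  else if pvC2 Matrix (pvY1B Matrix) then 2
  else if pvC3 Matrix (pvY2B Matrix) then 3
  else if pvC4 Matrix (pvY1B Matrix) then 4
  else 0

def to_1D_array_alt (Matrix : List (List Int)) (Major : String) : List Int :=
  let n := pvN Matrix
  let corner := pvCorner Matrix
  if corner == 0 then []
  else if Major == "r" then
    (PySem.List.pyRange 0 n 1).foldl (fun out i =>
      (PySem.List.pyRange 0 n 1).foldl (fun out j =>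
        if pvKeep corner n i j then out ++ [pvGet Matrix i j] else out) out) []
  else if Major == "c" then
    (PySem.List.pyRange 0 n 1).foldl (fun out j =>
      (PySem.List.pyRange 0 n 1).foldl (fun out i =>
        if pvKeep corner n i j then out ++ [pvGet Matrix i j] else out) out) []
  else []

-- ===== PRECONDITION & SPEC =====
-- Pre_ excludes exactly the inputs on which Python A raises IndexError: an empty matrix, or a row
-- shorter than len(Matrix) (A indexes columns 0 and len(Matrix)-1 of every row).
def Pre_to_1D_array (Matrix : List (List Int)) (Major : String) : Prop :=
  Matrix ≠ [] ∧ ∀ row ∈ Matrix, Matrix.length ≤ row.length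
instance (Matrix : List (List Int)) (Major : String) : Decidable (Pre_to_1D_array Matrix Major) := by
  unfold Pre_to_1D_array; infer_instance
def pvWitness_to_1D_array : List (List Int) × String := ([[1, 0], [1, 1]], "r")
def Spec_to_1D_array (Matrix : List (List Int)) (Major : String) (out : List Int) : Prop := out = to_1D_array_alt Matrix Major
instance (Matrix : List (List Int)) (Major : String) (out : List Int) : Decidable (Spec_to_1D_array Matrix Major out) := by unfold Spec_to_1D_array; infer_instance

-- ===== CLAIM (what is proved, stated in full; the proofs are below) =====
def Claim_equal_to_1D_array : Prop := ∀ (Matrix : List (List Int)) (Major : String), Dom_to_1D_array Matrix Major → Pre_to_1D_array Matrix Major → Spec_to_1D_array Matrix Major (to_1D_array Matrix Major)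

-- ===== LEMMAS AND PROOFS =====

theorem pvY1_eq (Matrix : List (List Int)) : pvY1A Matrix = pvY1B Matrix := by
  simp [pvY1A, pvY1B, PySem.List.foldl_add]

theorem pvY2_eq (Matrix : List (List Int)) : pvY2A Matrix = pvY2B Matrix := by
  simp [pvY2A, pvY2B, PySem.List.foldl_add]

theorem pv_filter_ge (n a : Int) (h0 : 0 ≤ a) :
    (PySem.List.pyRange 0 n 1).filter (fun i => decide (a ≤ i)) = PySem.List.pyRange a n 1 := by
  by_cases h : a ≤ n
  · rw [PySem.List.pyRange_one_append 0 a n h0 h, List.filter_append,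
      List.filter_eq_nil_iff.mpr, List.filter_eq_self.mpr, List.nil_append]
    · intro x hx
      rw [PySem.List.mem_pyRange_one] at hx
      simp; omega
    · intro x hx
      rw [PySem.List.mem_pyRange_one] at hx
      simp; omega
  · have h1 : PySem.List.pyRange a n 1 = [] := PySem.List.pyRange_one_eq_nil (by omega)
    rw [h1, List.filter_eq_nil_iff.mpr]
    intro x hx
    rw [PySem.List.mem_pyRange_one] at hx
    simp; omega

theorem pv_filter_le (n k : Int) (h0 : 0 ≤ k + 1) (h2 : k + 1 ≤ n) :
    (PySem.List.pyRange 0 n 1).filter (fun i => decide (i ≤ k)) = PySem.List.pyRange 0 (k + 1) 1 := by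
  rw [PySem.List.pyRange_one_append 0 (k + 1) n h0 h2, List.filter_append,
    List.filter_eq_self.mpr, List.filter_eq_nil_iff.mpr, List.append_nil]
  · intro x hx
    rw [PySem.List.mem_pyRange_one] at hx
    simp; omega
  · intro x hx
    rw [PySem.List.mem_pyRange_one] at hx
    simp; omega

-- B's filtered full-range inner loop with a lower-bound predicate is A's suffix-range inner loop
theorem pv_inner_ge (g : Int → Int) (n a : Int) (h0 : 0 ≤ a) (p : Int → Bool)
    (hp : ∀ i, 0 ≤ i → i < n → p i = decide (a ≤ i)) (acc : List Int) :
    (PySem.List.pyRange 0 n 1).foldl (fun out i => if p i then out ++ [g i] else out) acc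
      = (PySem.List.pyRange a n 1).foldl (fun out i => out ++ [g i]) acc := by
  rw [PySem.List.foldl_append_if, PySem.List.foldl_append_singleton_eq_map]
  have hc : List.filter p (PySem.List.pyRange 0 n 1)
      = List.filter (fun i => decide (a ≤ i)) (PySem.List.pyRange 0 n 1) :=
    List.filter_congr (fun i hi => by
      rw [PySem.List.mem_pyRange_one] at hi; exact hp i hi.1 hi.2)
  rw [hc, pv_filter_ge n a h0]

-- … and with an upper-bound predicate it is A's prefix-range inner loop
theorem pv_inner_le (g : Int → Int) (n k : Int) (h0 : 0 ≤ k + 1) (h2 : k + 1 ≤ n) (p : Int → Bool)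
    (hp : ∀ i, 0 ≤ i → i < n → p i = decide (i ≤ k)) (acc : List Int) :
    (PySem.List.pyRange 0 n 1).foldl (fun out i => if p i then out ++ [g i] else out) acc
      = (PySem.List.pyRange 0 (k + 1) 1).foldl (fun out i => out ++ [g i]) acc := by
  rw [PySem.List.foldl_append_if, PySem.List.foldl_append_singleton_eq_map]
  have hc : List.filter p (PySem.List.pyRange 0 n 1)
      = List.filter (fun i => decide (i ≤ k)) (PySem.List.pyRange 0 n 1) :=
    List.filter_congr (fun i hi => by
      rw [PySem.List.mem_pyRange_one] at hi; exact hp i hi.1 hi.2)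
  rw [hc, pv_filter_le n k h0 h2]

-- ===== VERDICT (by name: the statement is the Claim_ definition above) =====
theorem to_1D_array_spec : Claim_equal_to_1D_array := by
  intro M Major _dom pre
  unfold Spec_to_1D_array
  obtain ⟨hne, -⟩ := pre
  have hn : 1 ≤ pvN M := by
    have h0 : 0 < M.length := List.length_pos_of_ne_nil hne
    simp only [pvN]
    exact_mod_cast h0
  simp only [to_1D_array, to_1D_array_alt, pvCorner, ← pvY1_eq, ← pvY2_eq]
  by_cases h1 : pvC1 M (pvY2A M) = true
  · simp only [h1, if_true, beq_iff_eq]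
    split_ifs <;> try first | rfl | omega | (simp_all; done)
    · -- column-major, corner 1
      refine PySem.List.foldl_congr_mem _ _ _ _ ?_
      intro acc j hj
      rw [PySem.List.mem_pyRange_one] at hj
      exact (pv_inner_ge (fun i => pvGet M i j) (pvN M) j hj.1 _
        (fun i hi0 hi => by simp [pvKeep]) acc).symm
    · -- row-major, corner 1
      refine PySem.List.foldl_congr_mem _ _ _ _ ?_
      intro acc i hi
      rw [PySem.List.mem_pyRange_one] at hi
      exact (pv_inner_le (fun j => pvGet M i j) (pvN M) i (by omega) (by omega) _
        (fun j hj0 hj => by simp [pvKeep]) acc).symm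
  · simp only [h1, Bool.false_eq_true, if_false]
    by_cases h2 : pvC2 M (pvY1A M) = true
    · simp only [h2, if_true, beq_iff_eq]
      split_ifs <;> try first | rfl | omega | (simp_all; done)
      · -- column-major, corner 2
        refine PySem.List.foldl_congr_mem _ _ _ _ ?_
        intro acc j hj
        rw [PySem.List.mem_pyRange_one] at hj
        exact (pv_inner_ge (fun i => pvGet M i j) (pvN M) (pvN M - j - 1) (by omega) _
          (fun i hi0 hi => by
            simp [pvKeep]
            omega) acc).symm
      · -- row-major, corner 2
        refine PySem.List.foldl_congr_mem _ _ _ _ ?_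
        intro acc i hi
        rw [PySem.List.mem_pyRange_one] at hi
        exact (pv_inner_ge (fun j => pvGet M i j) (pvN M) (pvN M - i - 1) (by omega) _
          (fun j hj0 hj => by
            simp [pvKeep]
            omega) acc).symm
    · simp only [h2, Bool.false_eq_true, if_false]
      by_cases h3 : pvC3 M (pvY2A M) = true
      · simp only [h3, if_true, beq_iff_eq]
        split_ifs <;> try first | rfl | omega | (simp_all; done)
        · -- column-major, corner 3
          refine PySem.List.foldl_congr_mem _ _ _ _ ?_
          intro acc j hj
          rw [PySem.List.mem_pyRange_one] at hj
          rw [show pvN M - j = (pvN M - j - 1) + 1 from by ring]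
          exact (pv_inner_le (fun i => pvGet M i j) (pvN M) (pvN M - j - 1) (by omega) (by omega) _
            (fun i hi0 hi => by
              simp [pvKeep]
              omega) acc).symm
        · -- row-major, corner 3
          refine PySem.List.foldl_congr_mem _ _ _ _ ?_
          intro acc i hi
          rw [PySem.List.mem_pyRange_one] at hi
          rw [show pvN M - i = (pvN M - i - 1) + 1 from by ring]
          exact (pv_inner_le (fun j => pvGet M i j) (pvN M) (pvN M - i - 1) (by omega) (by omega) _
            (fun j hj0 hj => by
              simp [pvKeep]
              omega) acc).symm
      · simp only [h3, Bool.false_eq_true, if_false]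
        by_cases h4 : pvC4 M (pvY1A M) = true
        · simp only [h4, if_true, beq_iff_eq]
          split_ifs <;> try first | rfl | omega | (simp_all; done)
          · -- column-major, corner 4
            refine PySem.List.foldl_congr_mem _ _ _ _ ?_
            intro acc j hj
            rw [PySem.List.mem_pyRange_one] at hj
            exact (pv_inner_le (fun i => pvGet M i j) (pvN M) j (by omega) (by omega) _
              (fun i hi0 hi => by simp [pvKeep]) acc).symm
          · -- row-major, corner 4
            refine PySem.List.foldl_congr_mem _ _ _ _ ?_
            intro acc i hi
            rw [PySem.List.mem_pyRange_one] at hi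
            exact (pv_inner_ge (fun j => pvGet M i j) (pvN M) i hi.1 _
              (fun j hj0 hj => by simp [pvKeep]) acc).symm
        · simp [h4]
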